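-- pv_equiv track=rewrite | github.com/khuonggminhhoang/PYTHON_PTIT | dem_cap_dong_xu_PY02038.py | cnt_col
-- ===== SOURCE A (Python) =====
-- def cnt_col(lst, n):
--     ans = 0
--     for j in range(n):
--         cnt = 0
--         for i in range(n):
--             if lst[i][j] == 'C':
--                 cnt += 1
--         ans += cnt * (cnt - 1)//2
--     return ans
-- ===== SOURCE B (Python) =====
-- def cnt_col(lst, n):
--     # Count coin pairs directly: for every pair of rows (i1, i2) with i1 < i2,
--     # add 1 for each column j where both rows have a coin. No per-column
--     # counter and no c*(c-1)//2 formula are used anywhere.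
--     ans = 0
--     for i2 in range(n):
--         for i1 in range(i2):
--             for j in range(n):
--                 if lst[i1][j] == 'C' and lst[i2][j] == 'C':
--                     ans += 1
--     return ans
-- ===== Notes on version B (the rewrite author's own statement) =====
-- stated objective: alternative
-- what changed: B abandons the count-then-C(c,2)-formula approach entirely: it enumerates unordered pairs of rows and adds 1 for every column where both rows hold 'C', so the answer is built pair by pair with no per-column counter and no c*(c-1)//2 arithmetic.
import Mathlib
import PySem

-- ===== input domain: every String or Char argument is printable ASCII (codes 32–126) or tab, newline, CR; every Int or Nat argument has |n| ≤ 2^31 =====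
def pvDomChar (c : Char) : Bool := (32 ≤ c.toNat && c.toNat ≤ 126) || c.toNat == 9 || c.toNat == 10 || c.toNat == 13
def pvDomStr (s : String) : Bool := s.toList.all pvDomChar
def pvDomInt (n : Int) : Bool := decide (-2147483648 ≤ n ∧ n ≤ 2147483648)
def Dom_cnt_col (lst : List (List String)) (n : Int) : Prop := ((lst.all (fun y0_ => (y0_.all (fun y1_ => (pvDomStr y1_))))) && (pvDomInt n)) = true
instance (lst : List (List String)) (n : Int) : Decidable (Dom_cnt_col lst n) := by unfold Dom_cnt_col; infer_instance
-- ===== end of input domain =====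

-- B counts coin pairs directly by enumerating pairs of rows and matching columns (no per-column counter, no c*(c-1)//2 formula); proved equal to A's per-column count-and-formula scan.

-- ===== PORT A =====
def cnt_col (lst : List (List String)) (n : Int) : Int :=
  (PySem.List.pyRange 0 n 1).foldl (fun ans j =>
    let cnt : Int := (PySem.List.pyRange 0 n 1).foldl (fun cnt i =>
      if PySem.List.pyGetD (PySem.List.pyGetD lst i []) j "" = "C" then cnt + 1 else cnt) 0
    ans + PySem.Int.floordiv (cnt * (cnt - 1)) 2) 0

-- ===== PORT B =====
def cnt_col_alt (lst : List (List String)) (n : Int) : Int :=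
  (PySem.List.pyRange 0 n 1).foldl (fun ans i2 =>
    (PySem.List.pyRange 0 i2 1).foldl (fun ans i1 =>
      (PySem.List.pyRange 0 n 1).foldl (fun ans j =>
        if PySem.List.pyGetD (PySem.List.pyGetD lst i1 []) j "" = "C" ∧
           PySem.List.pyGetD (PySem.List.pyGetD lst i2 []) j "" = "C"
        then ans + 1 else ans) ans) ans) 0

-- ===== PRECONDITION & SPEC =====
-- Pre_ excludes exactly the inputs on which A raises IndexError: A needs n rows and n entries in each of those rows.
def Pre_cnt_col (lst : List (List String)) (n : Int) : Prop :=
  n ≤ (lst.length : Int) ∧ ∀ row ∈ lst.take n.toNat, n ≤ (row.length : Int)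
instance (lst : List (List String)) (n : Int) : Decidable (Pre_cnt_col lst n) := by unfold Pre_cnt_col; infer_instance

def pvWitness_cnt_col : List (List String) × Int := ([["C", "x"], ["C", "C"]], 2)

def Spec_cnt_col (lst : List (List String)) (n : Int) (out : Int) : Prop := out = cnt_col_alt lst n
instance (lst : List (List String)) (n : Int) (out : Int) : Decidable (Spec_cnt_col lst n out) := by unfold Spec_cnt_col; infer_instance

-- ===== CLAIM (what is proved, stated in full; the proofs are below) =====
def Claim_equal_cnt_col : Prop := ∀ (lst : List (List String)) (n : Int), Dom_cnt_col lst n → Pre_cnt_col lst n → Spec_cnt_col lst n (cnt_col lst n)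

-- ===== LEMMAS AND PROOFS =====

-- indicator: cell (i,j) holds a coin
def pvInd (lst : List (List String)) (i j : Int) : Int :=
  if PySem.List.pyGetD (PySem.List.pyGetD lst i []) j "" = "C" then 1 else 0

-- pair indicator: both rows i1 and i2 hold a coin in column j
def pvInd2 (lst : List (List String)) (i1 i2 j : Int) : Int :=
  if PySem.List.pyGetD (PySem.List.pyGetD lst i1 []) j "" = "C" ∧
     PySem.List.pyGetD (PySem.List.pyGetD lst i2 []) j "" = "C" then 1 else 0

-- number of coins in column j among rows 0..m-1
def pvCnt (lst : List (List String)) (m j : Int) : Int :=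
  ((PySem.List.pyRange 0 m 1).map (fun i => pvInd lst i j)).sum

def pvC2 (c : Int) : Int := PySem.Int.floordiv (c * (c - 1)) 2

theorem pv_sum_map_add {α : Type} (L : List α) (f g : α → Int) :
    (L.map (fun x => f x + g x)).sum = (L.map f).sum + (L.map g).sum := by
  induction L with
  | nil => simp
  | cons a L ih => simp only [List.map_cons, List.sum_cons, ih]; ring

theorem pv_sum_map_mul_right {α : Type} (L : List α) (f : α → Int) (c : Int) :
    (L.map (fun x => f x * c)).sum = (L.map f).sum * c := by
  induction L with
  | nil => simp
  | cons a L ih => simp only [List.map_cons, List.sum_cons, ih]; ring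

theorem pv_sum_swap {α β : Type} (L : List α) (M : List β) (f : α → β → Int) :
    (L.map (fun x => (M.map (fun y => f x y)).sum)).sum
      = (M.map (fun y => (L.map (fun x => f x y)).sum)).sum := by
  induction L with
  | nil => simp
  | cons a L ih =>
    simp only [List.map_cons, List.sum_cons, ih, ← pv_sum_map_add]

-- C(c+1,2) = C(c,2) + c, with Python's floor division
theorem pvC2_succ (c : Int) : pvC2 (c + 1) = pvC2 c + c := by
  unfold pvC2
  rw [PySem.Int.floordiv_eq_ediv_of_pos (by norm_num), PySem.Int.floordiv_eq_ediv_of_pos (by norm_num)]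
  have h : (c + 1) * (c + 1 - 1) = c * (c - 1) + c * 2 := by ring
  rw [h, Int.add_mul_ediv_right _ _ (by norm_num : (2:Int) ≠ 0)]

-- A's result is the per-column sum of C(count,2)
theorem pvA_eq (lst : List (List String)) (n : Int) :
    cnt_col lst n = ((PySem.List.pyRange 0 n 1).map (fun j => pvC2 (pvCnt lst n j))).sum := by
  unfold cnt_col
  have hin : ∀ j : Int,
      (PySem.List.pyRange 0 n 1).foldl (fun cnt i =>
        if PySem.List.pyGetD (PySem.List.pyGetD lst i []) j "" = "C" then cnt + 1 else cnt) 0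
        = pvCnt lst n j := by
    intro j
    have hf : (fun (cnt i : Int) =>
        if PySem.List.pyGetD (PySem.List.pyGetD lst i []) j "" = "C" then cnt + 1 else cnt)
        = (fun cnt i => cnt + pvInd lst i j) := by
      funext cnt i; unfold pvInd; split <;> simp
    rw [hf, PySem.List.foldl_add]
    simp [pvCnt]
  have hg : (fun (ans j : Int) =>
      let cnt : Int := (PySem.List.pyRange 0 n 1).foldl (fun cnt i =>
        if PySem.List.pyGetD (PySem.List.pyGetD lst i []) j "" = "C" then cnt + 1 else cnt) 0
      ans + PySem.Int.floordiv (cnt * (cnt - 1)) 2)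
      = (fun ans j => ans + pvC2 (pvCnt lst n j)) := by
    funext ans j; simp only [hin j]; rfl
  rw [hg, PySem.List.foldl_add]
  simp

-- B's result is the triple sum of pair indicators
theorem pvB_eq (lst : List (List String)) (n : Int) :
    cnt_col_alt lst n
      = ((PySem.List.pyRange 0 n 1).map (fun i2 =>
          ((PySem.List.pyRange 0 i2 1).map (fun i1 =>
            ((PySem.List.pyRange 0 n 1).map (fun j => pvInd2 lst i1 i2 j)).sum)).sum)).sum := by
  unfold cnt_col_alt
  have h1 : ∀ i1 i2 : Int, ∀ a : Int,
      (PySem.List.pyRange 0 n 1).foldl (fun ans j =>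
        if PySem.List.pyGetD (PySem.List.pyGetD lst i1 []) j "" = "C" ∧
           PySem.List.pyGetD (PySem.List.pyGetD lst i2 []) j "" = "C"
        then ans + 1 else ans) a
        = a + ((PySem.List.pyRange 0 n 1).map (fun j => pvInd2 lst i1 i2 j)).sum := by
    intro i1 i2 a
    have hf : (fun (ans j : Int) =>
        if PySem.List.pyGetD (PySem.List.pyGetD lst i1 []) j "" = "C" ∧
           PySem.List.pyGetD (PySem.List.pyGetD lst i2 []) j "" = "C"
        then ans + 1 else ans) = (fun ans j => ans + pvInd2 lst i1 i2 j) := by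
      funext ans j; unfold pvInd2; split <;> simp
    rw [hf, PySem.List.foldl_add]
  have h2 : ∀ i2 : Int, ∀ a : Int,
      (PySem.List.pyRange 0 i2 1).foldl (fun ans i1 =>
        (PySem.List.pyRange 0 n 1).foldl (fun ans j =>
          if PySem.List.pyGetD (PySem.List.pyGetD lst i1 []) j "" = "C" ∧
             PySem.List.pyGetD (PySem.List.pyGetD lst i2 []) j "" = "C"
          then ans + 1 else ans) ans) a
        = a + ((PySem.List.pyRange 0 i2 1).map (fun i1 =>
            ((PySem.List.pyRange 0 n 1).map (fun j => pvInd2 lst i1 i2 j)).sum)).sum := by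
    intro i2 a
    have hf : (fun (ans i1 : Int) =>
        (PySem.List.pyRange 0 n 1).foldl (fun ans j =>
          if PySem.List.pyGetD (PySem.List.pyGetD lst i1 []) j "" = "C" ∧
             PySem.List.pyGetD (PySem.List.pyGetD lst i2 []) j "" = "C"
          then ans + 1 else ans) ans)
        = (fun ans i1 => ans + ((PySem.List.pyRange 0 n 1).map (fun j => pvInd2 lst i1 i2 j)).sum) := by
      funext ans i1; exact h1 i1 i2 ans
    rw [hf, PySem.List.foldl_add]
  have hf : (fun (ans i2 : Int) =>
      (PySem.List.pyRange 0 i2 1).foldl (fun ans i1 =>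
        (PySem.List.pyRange 0 n 1).foldl (fun ans j =>
          if PySem.List.pyGetD (PySem.List.pyGetD lst i1 []) j "" = "C" ∧
             PySem.List.pyGetD (PySem.List.pyGetD lst i2 []) j "" = "C"
          then ans + 1 else ans) ans) ans)
      = (fun ans i2 => ans + ((PySem.List.pyRange 0 i2 1).map (fun i1 =>
          ((PySem.List.pyRange 0 n 1).map (fun j => pvInd2 lst i1 i2 j)).sum)).sum) := by
    funext ans i2; exact h2 i2 ans
  rw [hf, PySem.List.foldl_add]
  simp

-- row m's contribution: matches with earlier rows, summed per column
theorem pv_row_contrib (lst : List (List String)) (n m : Int) :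
    ((PySem.List.pyRange 0 m 1).map (fun i1 =>
      ((PySem.List.pyRange 0 n 1).map (fun j => pvInd2 lst i1 m j)).sum)).sum
      = ((PySem.List.pyRange 0 n 1).map (fun j => pvInd lst m j * pvCnt lst m j)).sum := by
  rw [pv_sum_swap]
  apply congrArg
  apply List.map_congr_left
  intro j _
  have h : ∀ i1 : Int, pvInd2 lst i1 m j = pvInd lst i1 j * pvInd lst m j := by
    intro i1
    unfold pvInd2 pvInd
    by_cases h1 : PySem.List.pyGetD (PySem.List.pyGetD lst i1 []) j "" = "C" <;>
      by_cases h2 : PySem.List.pyGetD (PySem.List.pyGetD lst m []) j "" = "C" <;>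
      simp [h1, h2]
  calc ((PySem.List.pyRange 0 m 1).map (fun i1 => pvInd2 lst i1 m j)).sum
      = ((PySem.List.pyRange 0 m 1).map (fun i1 => pvInd lst i1 j * pvInd lst m j)).sum := by
        apply congrArg; exact List.map_congr_left (fun i1 _ => h i1)
    _ = pvCnt lst m j * pvInd lst m j := by
        rw [pv_sum_map_mul_right]; rfl
    _ = pvInd lst m j * pvCnt lst m j := by ring

-- column counts over one more row
theorem pvCnt_succ (lst : List (List String)) (m j : Int) (hm : 0 ≤ m) :
    pvCnt lst (m + 1) j = pvCnt lst m j + pvInd lst m j := by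
  unfold pvCnt
  rw [PySem.List.pyRange_one_succ_right hm]
  simp

-- main invariant: B's partial sums over the first m rows equal the per-column C(count,2) sums
theorem pv_main (lst : List (List String)) (n : Int) :
    ∀ m : Nat, ((m : Int)) ≤ n →
    ((PySem.List.pyRange 0 (m : Int) 1).map (fun i2 =>
        ((PySem.List.pyRange 0 i2 1).map (fun i1 =>
          ((PySem.List.pyRange 0 n 1).map (fun j => pvInd2 lst i1 i2 j)).sum)).sum)).sum
      = ((PySem.List.pyRange 0 n 1).map (fun j => pvC2 (pvCnt lst (m : Int) j))).sum := by
  intro m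
  induction m with
  | zero =>
    intro _
    simp only [Nat.cast_zero]
    rw [PySem.List.pyRange_one_eq_nil (le_refl (0:Int))]
    have h : ∀ j : Int, pvC2 (pvCnt lst (0:Int) j) = 0 := by
      intro j
      unfold pvCnt
      rw [PySem.List.pyRange_one_eq_nil (le_refl (0:Int))]
      simp only [List.map_nil, List.sum_nil]
      decide
    simp only [List.map_nil, List.sum_nil]
    rw [List.map_congr_left (fun j _ => h j)]
    simp
  | succ m ih =>
    intro hm1
    have hcast : ((m + 1 : Nat) : Int) = (m : Int) + 1 := by push_cast; ring
    have hm0 : (0:Int) ≤ (m : Int) := by positivity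
    have hm : ((m : Int)) ≤ n := by omega
    rw [hcast, PySem.List.pyRange_one_succ_right hm0, List.map_append, List.sum_append,
        ih hm]
    simp only [List.map_cons, List.map_nil, List.sum_cons, List.sum_nil, Int.add_zero]
    rw [pv_row_contrib lst n (m : Int), ← pv_sum_map_add]
    apply congrArg
    apply List.map_congr_left
    intro j _
    rw [pvCnt_succ lst (m : Int) j hm0]
    unfold pvInd
    by_cases h : PySem.List.pyGetD (PySem.List.pyGetD lst (m:Int) []) j "" = "C"
    · simp only [h, if_pos]
      rw [pvC2_succ]
      simp
    · simp only [h, if_false]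
      simp

-- ===== VERDICT (by name: the statement is the Claim_ definition above) =====
theorem cnt_col_spec : Claim_equal_cnt_col := by
  intro lst n _ _
  unfold Spec_cnt_col
  rw [pvA_eq, pvB_eq]
  by_cases hn : 0 ≤ n
  · have hcast : ((n.toNat : Nat) : Int) = n := by omega
    have := pv_main lst n n.toNat (by omega)
    rw [hcast] at this
    exact this.symm
  · rw [PySem.List.pyRange_one_eq_nil (by omega : n ≤ 0)]
    simp
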